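-- pv_equiv track=rewrite | github.com/VandalTryHard/codewars_Python | 7 kyu/Password_maker.py | make_password
-- ===== SOURCE A (Python) =====
-- def make_password(phrase):
--     phraseList = phrase.split()
--     password = ""
--     for i in range(len(phraseList)):
--         if phraseList[i][0] == "i" or phraseList[i][0] == "I":
--             password = password + "1"
--         elif phraseList[i][0] == "o" or phraseList[i][0] == "O":
--             password = password + "0"
--         elif phraseList[i][0] == "s" or phraseList[i][0] == "S":
--             password = password + "5"
--         else:
--             password = password + phraseList[i][0]
--     return password
-- ===== SOURCE B (Python) =====
-- _SUB = {'i': '1', 'I': '1', 'o': '0', 'O': '0', 's': '5', 'S': '5'}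
--
-- def make_password(phrase):
--     # single pass over the raw characters: no split(); emit at each word start
--     out = []
--     in_word = False
--     for c in phrase:
--         if c.isspace():
--             in_word = False
--         elif not in_word:
--             out.append(_SUB.get(c, c))
--             in_word = True
--     return ''.join(out)
-- ===== Notes on version B (the rewrite author's own statement) =====
-- stated objective: alternative
-- what changed: B drops split() entirely and runs a single character-level state machine over the raw phrase, tracking an in-word flag and emitting the substituted character at each word boundary, instead of A's split-then-index-loop over words.
import Mathlib
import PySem

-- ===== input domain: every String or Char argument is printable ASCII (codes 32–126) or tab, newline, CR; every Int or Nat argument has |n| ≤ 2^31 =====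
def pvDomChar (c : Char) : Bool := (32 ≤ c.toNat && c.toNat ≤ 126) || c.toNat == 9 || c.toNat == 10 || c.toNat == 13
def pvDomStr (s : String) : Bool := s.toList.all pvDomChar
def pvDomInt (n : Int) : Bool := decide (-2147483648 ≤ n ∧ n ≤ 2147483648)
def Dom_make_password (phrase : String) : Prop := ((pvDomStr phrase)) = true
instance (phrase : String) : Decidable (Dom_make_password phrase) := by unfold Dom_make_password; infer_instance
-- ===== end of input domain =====

-- B replaces A's split-then-loop-over-words by a single character-level state machine
-- over the raw phrase (alternative decomposition, same cost).

-- ===== PORT A =====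
-- one loop step of A: append the (substituted) first letter of the i-th word to the accumulator
def pvStepA (password : List Char) (w : String) : List Char :=
  match PySem.Str.pyGet? w 0 with
  | none => password  -- unreachable: split() yields no empty word (Python would raise IndexError)
  | some c =>
    if c = 'i' ∨ c = 'I' then password ++ ['1']
    else if c = 'o' ∨ c = 'O' then password ++ ['0']
    else if c = 's' ∨ c = 'S' then password ++ ['5']
    else password ++ [c]

def make_password (phrase : String) : String :=
  let phraseList := PySem.Str.split₀ phrase
  let password : List Char := []
  String.ofList ((PySem.List.pyRange 0 (phraseList.length : Int) 1).foldl
    (fun password i => pvStepA password (PySem.List.pyGetD phraseList i "")) password)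

-- ===== PORT B =====
-- the module-level _SUB dict of Source B
def pvSubTable : List (Char × Char) := [('i','1'), ('I','1'), ('o','0'), ('O','0'), ('s','5'), ('S','5')]

-- _SUB.get(c, c)
def pvSub (c : Char) : Char := (pvSubTable.lookup c).getD c

-- one loop step of B: state = (output so far, in_word flag)
def pvStepB (st : List Char × Bool) (c : Char) : List Char × Bool :=
  if PySem.Chars.isspace c then (st.1, false)
  else if st.2 = false then (st.1 ++ [pvSub c], true)
  else st

def make_password_alt (phrase : String) : String :=
  String.ofList ((phrase.toList.foldl pvStepB ([], false)).1)

-- ===== PRECONDITION & SPEC =====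
def Spec_make_password (phrase : String) (out : String) : Prop := out = make_password_alt phrase
instance (phrase : String) (out : String) : Decidable (Spec_make_password phrase out) := by unfold Spec_make_password; infer_instance

-- ===== CLAIM (what is proved, stated in full; the proofs are below) =====
def Claim_equal_make_password : Prop := ∀ (phrase : String), Dom_make_password phrase → Spec_make_password phrase (make_password phrase)

-- ===== LEMMAS AND PROOFS =====

-- the substituted initials of the words of cs
def pvInitials (cs : List Char) : List Char :=
  (PySem.Chars.split₀ cs).filterMap List.head? |>.map pvSub

-- unfolding equations for split₀'s inner state machine
theorem pvGo_nil (cur : List Char) (acc : List (List Char)) :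
    PySem.Chars.split₀.go [] cur acc =
      if cur = [] then acc.reverse else (cur.reverse :: acc).reverse := by
  simp only [PySem.Chars.split₀.go, List.isEmpty_iff]

theorem pvGo_cons (c : Char) (cs cur : List Char) (acc : List (List Char)) :
    PySem.Chars.split₀.go (c :: cs) cur acc =
      if PySem.Chars.isspace c then
        (if cur = [] then PySem.Chars.split₀.go cs [] acc
         else PySem.Chars.split₀.go cs [] (cur.reverse :: acc))
      else PySem.Chars.split₀.go cs (c :: cur) acc := by
  simp only [PySem.Chars.split₀.go, List.isEmpty_iff]

-- A-side: one step appends the substituted first char of the word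
theorem pvStepA_eq (password : List Char) (w : String) :
    pvStepA password w =
      password ++ ((PySem.Str.pyGet? w 0).toList.map pvSub) := by
  unfold pvStepA
  cases h : PySem.Str.pyGet? w 0 with
  | none => simp
  | some c =>
    simp only [Option.toList_some, List.map_cons, List.map_nil]
    by_cases h1 : c = 'i' <;> by_cases h2 : c = 'I' <;> by_cases h3 : c = 'o' <;>
      by_cases h4 : c = 'O' <;> by_cases h5 : c = 's' <;> by_cases h6 : c = 'S' <;>
      simp [pvSub, pvSubTable, List.lookup, h1, h2, h3, h4, h5, h6]
    simp [beq_eq_false_iff_ne.mpr h1, beq_eq_false_iff_ne.mpr h2, beq_eq_false_iff_ne.mpr h3,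
      beq_eq_false_iff_ne.mpr h4, beq_eq_false_iff_ne.mpr h5, beq_eq_false_iff_ne.mpr h6]

theorem foldl_stepA (ws : List String) (acc : List Char) :
    ws.foldl pvStepA acc =
      acc ++ (ws.filterMap (fun w => PySem.Str.pyGet? w 0)).map pvSub := by
  induction ws generalizing acc with
  | nil => simp
  | cons w ws ih =>
    simp only [List.foldl_cons, ih, pvStepA_eq, List.filterMap_cons]
    cases PySem.Str.pyGet? w 0 <;> simp

-- split₀.go: the trailing accumulator factors out
theorem split0_go_acc (cs : List Char) (cur : List Char) (acc : List (List Char)) :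
    PySem.Chars.split₀.go cs cur acc = acc.reverse ++ PySem.Chars.split₀.go cs cur [] := by
  induction cs generalizing cur acc with
  | nil =>
    by_cases h : cur = [] <;> simp [pvGo_nil, h]
  | cons c cs ih =>
    by_cases hs : PySem.Chars.isspace c
    · by_cases h : cur = []
      · subst h
        rw [pvGo_cons, pvGo_cons, if_pos hs, if_pos hs, if_pos rfl, if_pos rfl]
        exact ih [] acc
      · rw [pvGo_cons, pvGo_cons, if_pos hs, if_pos hs, if_neg h, if_neg h,
          ih, ih _ [cur.reverse]]
        simp
    · simp only [pvGo_cons, hs]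
      exact ih _ _

-- split₀.go with a nonempty current word: the first word extends cur, the rest restart after it
theorem split0_go_nonempty (cs : List Char) (cur : List Char) (h : cur ≠ []) :
    ∃ w, PySem.Chars.split₀.go cs cur [] =
      (cur.reverse ++ w) :: PySem.Chars.split₀ (cs.dropWhile (fun c => !PySem.Chars.isspace c)) := by
  induction cs generalizing cur with
  | nil =>
    exact ⟨[], by simp [pvGo_nil, h, PySem.Chars.split₀, PySem.Chars.split₀.go]⟩
  | cons c cs ih =>
    by_cases hs : PySem.Chars.isspace c
    · refine ⟨[], ?_⟩
      simp only [pvGo_cons, hs, if_true, h, if_false, List.dropWhile_cons, Bool.not_true]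
      rw [split0_go_acc]
      simp [PySem.Chars.split₀, hs, pvGo_cons]
    · obtain ⟨w', hw'⟩ := ih (c :: cur) (by simp)
      refine ⟨c :: w', ?_⟩
      simp only [pvGo_cons, hs, List.dropWhile_cons, Bool.not_eq_eq_eq_not, Bool.not_true]
      rw [hw']
      simp

-- initials recurrences
theorem pvInitials_nil : pvInitials [] = [] := by
  simp [pvInitials, PySem.Chars.split₀, pvGo_nil]

theorem pvInitials_space (c : Char) (cs : List Char) (hs : PySem.Chars.isspace c = true) :
    pvInitials (c :: cs) = pvInitials cs := by
  simp [pvInitials, PySem.Chars.split₀, pvGo_cons, hs]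

theorem pvInitials_word (c : Char) (cs : List Char) (hs : PySem.Chars.isspace c = false) :
    pvInitials (c :: cs) =
      pvSub c :: pvInitials (cs.dropWhile (fun c => !PySem.Chars.isspace c)) := by
  obtain ⟨w, hw⟩ := split0_go_nonempty cs [c] (by simp)
  simp only [pvInitials, PySem.Chars.split₀, pvGo_cons, hs]
  rw [hw]
  simp [PySem.Chars.split₀]

-- B-side: starting in_word=true is the same as skipping the rest of the current word
theorem foldl_stepB_true (cs : List Char) (out : List Char) :
    (cs.foldl pvStepB (out, true)).1 =
      ((cs.dropWhile (fun c => !PySem.Chars.isspace c)).foldl pvStepB (out, false)).1 := by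
  induction cs generalizing out with
  | nil => rfl
  | cons c cs ih =>
    by_cases hs : PySem.Chars.isspace c
    · simp [pvStepB, hs]
    · simp only [List.foldl_cons, pvStepB, hs, Bool.true_eq_false,
        List.dropWhile_cons, Bool.not_eq_eq_eq_not, Bool.not_true]
      simpa [hs] using ih out

-- B-side main invariant: from in_word=false the machine emits exactly the substituted initials
theorem foldl_stepB_false (cs : List Char) (out : List Char) :
    (cs.foldl pvStepB (out, false)).1 = out ++ pvInitials cs := by
  induction hn : cs.length using Nat.strong_induction_on generalizing cs out with
  | _ n ih =>
    cases cs with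
    | nil => simp [pvInitials_nil]
    | cons c cs =>
      by_cases hs : PySem.Chars.isspace c
      · simp only [List.foldl_cons, pvStepB, hs, if_true, pvInitials_space c cs hs]
        exact ih cs.length (by simp [← hn]) cs out rfl
      · simp only [List.foldl_cons, pvStepB, hs]
        simp only [Bool.false_eq_true, if_false, if_true]
        rw [foldl_stepB_true,
          ih (cs.dropWhile (fun c => !PySem.Chars.isspace c)).length
            (by simpa [← hn] using Nat.lt_succ_of_le (cs.length_dropWhile_le _)) _ _ rfl,
          pvInitials_word c cs (by simpa using hs)]
        simp

-- first char of a split₀ word, through the String wrapper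
theorem pyGet0_ofList (w : List Char) :
    PySem.Str.pyGet? (String.ofList w) 0 = w.head? := by
  cases w <;> simp [PySem.Str.pyGet?, PySem.List.pyGet?, PySem.List.pyIdx?]

-- ===== VERDICT (by name: the statement is the Claim_ definition above) =====
theorem make_password_spec : Claim_equal_make_password := by
  intro phrase _
  show make_password phrase = make_password_alt phrase
  simp only [make_password, make_password_alt]
  rw [PySem.List.foldl_pyRange_zero_pyGetD' (PySem.Str.split₀ phrase) "" pvStepA []]
  rw [foldl_stepA, foldl_stepB_false]
  simp only [List.nil_append, PySem.Str.split₀, List.filterMap_map, pvInitials]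
  rw [show ((fun w => PySem.Str.pyGet? w 0) ∘ String.ofList) = List.head? from funext pyGet0_ofList]
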